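-- pv_equiv track=rewrite | github.com/Jester6136/CLNER | crawler/pubmed_api.py | find_sentences_with_keywords
-- ===== SOURCE A (Python) =====
-- def find_sentences_with_keywords(keywords, sentences):
--     result = []
--     seen = set()
--     for i, sentence in enumerate(sentences):
--         for keyword in keywords:
--             if keyword in sentence and sentence not in seen:
--                 result.append(i)
--                 seen.add(sentence)
--                 break
--     return result
-- ===== SOURCE B (Python) =====
-- def find_sentences_with_keywords(keywords, sentences):
--     # Map each distinct sentence to its first index, then test each distinct
--     # sentence against the keywords exactly once.
--     first = {}
--     for i, s in enumerate(sentences):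
--         if s not in first:
--             first[s] = i
--     return [i for s, i in first.items() if any(k in s for k in keywords)]
-- ===== Notes on version B (the rewrite author's own statement) =====
-- stated objective: faster
-- what changed: B first dedupes sentences into a first-occurrence-index dict and then filters the distinct sentences by keyword match in a comprehension, instead of A's per-sentence keyword loop with a mutable 'seen' set; each distinct sentence is scanned against the keywords only once, so on duplicate-heavy inputs the keyword scans drop from O(n*k*L) to O(u*k*L) for u distinct sentences.
import Mathlib
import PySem

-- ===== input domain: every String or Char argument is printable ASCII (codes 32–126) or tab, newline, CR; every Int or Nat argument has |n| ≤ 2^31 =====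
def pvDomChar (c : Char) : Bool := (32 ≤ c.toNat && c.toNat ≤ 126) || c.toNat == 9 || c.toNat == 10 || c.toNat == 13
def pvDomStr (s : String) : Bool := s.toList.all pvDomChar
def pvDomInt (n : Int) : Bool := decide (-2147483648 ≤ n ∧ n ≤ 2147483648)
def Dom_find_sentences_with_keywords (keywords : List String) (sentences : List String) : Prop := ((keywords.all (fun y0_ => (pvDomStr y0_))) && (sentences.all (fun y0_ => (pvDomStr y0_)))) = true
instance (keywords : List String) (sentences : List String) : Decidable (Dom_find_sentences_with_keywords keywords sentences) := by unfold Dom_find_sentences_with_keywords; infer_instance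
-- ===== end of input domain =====

-- B replaces A's per-sentence keyword loop + mutable 'seen' set by a first-occurrence
-- dict built once, then one keyword scan per DISTINCT sentence (faster when sentences repeat).

-- ===== PORT A =====
-- inner 'for keyword in keywords: … break' loop of A
def pvInnerA (s : String) (i : Int) (res : List Int) (seen : PySem.Set String) :
    List String → List Int × PySem.Set String
  | [] => (res, seen)
  | k :: ks =>
    if PySem.Str.isIn k s && !(PySem.Set.contains seen s) then
      (res ++ [i], PySem.Set.add seen s)
    else
      pvInnerA s i res seen ks

def find_sentences_with_keywords (keywords : List String) (sentences : List String) : List Int :=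
  ((PySem.List.enumerate sentences).foldl
    (fun st p => pvInnerA p.2 p.1 st.1 st.2 keywords)
    ([], PySem.Set.empty)).1

-- ===== PORT B =====
def find_sentences_with_keywords_alt (keywords : List String) (sentences : List String) : List Int :=
  let first : PySem.Dict String Int :=
    (PySem.List.enumerate sentences).foldl
      (fun d p => if d.contains p.2 then d else d.insert p.2 p.1) PySem.Dict.empty
  (first.items.filter (fun p => keywords.any (fun k => PySem.Str.isIn k p.1))).map (fun p => p.2)

-- ===== PRECONDITION & SPEC =====
def Spec_find_sentences_with_keywords (keywords : List String) (sentences : List String) (out : List Int) : Prop := out = find_sentences_with_keywords_alt keywords sentences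
instance (keywords : List String) (sentences : List String) (out : List Int) : Decidable (Spec_find_sentences_with_keywords keywords sentences out) := by unfold Spec_find_sentences_with_keywords; infer_instance

-- ===== CLAIM (what is proved, stated in full; the proofs are below) =====
def Claim_equal_find_sentences_with_keywords : Prop := ∀ (keywords : List String) (sentences : List String), Dom_find_sentences_with_keywords keywords sentences → Spec_find_sentences_with_keywords keywords sentences (find_sentences_with_keywords keywords sentences)

-- ===== LEMMAS AND PROOFS =====

-- A's inner loop, characterised: append i and record s iff some keyword occurs and s is unseen
theorem pvInnerA_eq (s : String) (i : Int) (res : List Int) (seen : PySem.Set String)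
    (keywords : List String) :
    pvInnerA s i res seen keywords =
      if (keywords.any (fun k => PySem.Str.isIn k s)) && !(PySem.Set.contains seen s) then
        (res ++ [i], PySem.Set.add seen s)
      else (res, seen) := by
  induction keywords with
  | nil => simp [pvInnerA]
  | cons k ks ih =>
    simp only [pvInnerA, List.any_cons, ih]
    by_cases h1 : PySem.Str.isIn k s = true <;>
      by_cases h2 : PySem.Set.contains seen s = true <;>
        simp <;> simp [Bool.not_eq_true] at h1 h2 <;> simp [h1, h2]

theorem pv_invariant (keywords : List String) (l : List (Int × String))
    (d : PySem.Dict String Int) (res : List Int) (seen : PySem.Set String)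
    (h1 : res = (d.items.filter (fun p => keywords.any (fun k => PySem.Str.isIn k p.1))).map (fun p => p.2))
    (h2 : seen = (d.items.filter (fun p => keywords.any (fun k => PySem.Str.isIn k p.1))).map (fun p => p.1)) :
    (l.foldl (fun st p => pvInnerA p.2 p.1 st.1 st.2 keywords) (res, seen)).1 =
      ((l.foldl (fun d p => if d.contains p.2 then d else d.insert p.2 p.1) d).items.filter
        (fun p => keywords.any (fun k => PySem.Str.isIn k p.1))).map (fun p => p.2) := by
  induction l generalizing d res seen with
  | nil => simpa using h1
  | cons p l ih =>
    obtain ⟨i, s⟩ := p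
    simp only [List.foldl_cons]
    rw [pvInnerA_eq]
    by_cases hc : d.contains s = true
    · -- s already a key of d: B leaves d unchanged
      have hmem : s ∈ d.items.map (fun p => p.1) :=
        (PySem.Dict.contains_iff_mem_keys d s).mp hc
      by_cases hm : (keywords.any (fun k => PySem.Str.isIn k s)) = true
      · have hseen : PySem.Set.contains seen s = true := by
          obtain ⟨⟨s', v⟩, hp, he⟩ := List.mem_map.mp hmem
          simp only at he
          rw [PySem.Set.contains_iff, h2]
          refine List.mem_map.mpr ⟨(s', v), List.mem_filter.mpr ⟨hp, ?_⟩, he⟩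
          simp only [he]
          simpa using hm
        simp only [hm, hseen, Bool.not_true, Bool.and_false, Bool.false_eq_true, if_false, hc,
          if_true]
        exact ih d res seen h1 h2
      · simp only [Bool.not_eq_true] at hm
        simp only [hm, Bool.false_and, Bool.false_eq_true, if_false, hc, if_true]
        exact ih d res seen h1 h2
    · -- s is a fresh key: B appends (s, i)
      have hc' : d.contains s = false := by simpa using hc
      have hnot : s ∉ d.items.map (fun p => p.1) := fun hmem =>
        hc ((PySem.Dict.contains_iff_mem_keys d s).mpr hmem)
      have hsmem : s ∉ seen := by
        intro hs
        apply hnot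
        rw [h2] at hs
        obtain ⟨q, hq, he⟩ := List.mem_map.mp hs
        exact List.mem_map.mpr ⟨q, (List.mem_filter.mp hq).1, he⟩
      have hseen : PySem.Set.contains seen s = false := by
        rw [Bool.eq_false_iff]
        intro h
        exact hsmem ((PySem.Set.contains_iff seen s).mp h)
      have hitems : (d.insert s i).items = d.items ++ [(s, i)] :=
        PySem.Dict.items_insert_of_not_contains d i hc'
      by_cases hm : (keywords.any (fun k => PySem.Str.isIn k s)) = true
      · have hadd : PySem.Set.add seen s = seen ++ [s] := by
          simp only [PySem.Set.add, hseen, Bool.false_eq_true, if_false]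
        simp only [hm, hseen, Bool.not_false, Bool.and_true, if_true, hc', Bool.false_eq_true,
          if_false]
        apply ih (d.insert s i)
        · rw [hitems, List.filter_append, List.map_append, ← h1]
          simp only [List.filter_cons, List.filter_nil, hm, if_true, List.map_cons, List.map_nil]
        · rw [hitems, List.filter_append, List.map_append, ← h2, hadd]
          simp only [List.filter_cons, List.filter_nil, hm, if_true, List.map_cons, List.map_nil]
      · simp only [Bool.not_eq_true] at hm
        simp only [hm, Bool.false_and, Bool.false_eq_true, if_false, hc', ]
        apply ih (d.insert s i)
        · rw [hitems, List.filter_append]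
          simp only [List.filter_cons, List.filter_nil, hm, Bool.false_eq_true, if_false,
            List.append_nil]
          exact h1
        · rw [hitems, List.filter_append]
          simp only [List.filter_cons, List.filter_nil, hm, Bool.false_eq_true, if_false,
            List.append_nil]
          exact h2

-- ===== VERDICT (by name: the statement is the Claim_ definition above) =====
theorem find_sentences_with_keywords_spec : Claim_equal_find_sentences_with_keywords := by
  intro keywords sentences _
  show _ = _
  unfold find_sentences_with_keywords find_sentences_with_keywords_alt
  exact pv_invariant keywords (PySem.List.enumerate sentences) PySem.Dict.empty [] PySem.Set.empty
    (by simp [PySem.Dict.empty]) (by simp [PySem.Dict.empty])
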